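-- pv_equiv track=rewrite | github.com/pytrip/pytrip | pytrip/res/concave_tool.py | group_points_for_multiple_contours
-- ===== SOURCE A (Python) =====
-- def group_points_for_multiple_contours(points_lists):
--     """
--     Divides points into groups that will be used to construct contour for each one.
--     """
--     # empty array for each group/contour
--     multiple_contours = []
--     # empty array for current group/contour
--     current_contour = []
--
--     for points_list in points_lists:
--         # if current list of points (intersection) is not empty, append that list to current group
--         if len(points_list) > 0:
--             current_contour.append(points_list)
--         # if it is empty it means that current contour has ended
--         else:
--             # save current contour as one of multiple ones
--             multiple_contours.append(current_contour)
--             # create new empty group/contour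
--             current_contour = []
--     # save the last contour if it exists
--     if current_contour:
--         multiple_contours.append(current_contour)
--     # remove empty ones
--     #   it could be done earlier by filtering list passed as parameter
--     multiple_contours = [contour for contour in multiple_contours if contour]
--     # return only non-empty groups/contours
--     return multiple_contours
-- ===== SOURCE B (Python) =====
-- def group_points_for_multiple_contours(points_lists):
--     """
--     Divides points into groups that will be used to construct contour for each one.
--     Run-scanning version: jump from one non-empty run to the next and slice it out.
--     """
--     result = []
--     i = 0
--     n = len(points_lists)
--     while i < n:
--         if len(points_lists[i]) > 0:
--             j = i + 1
--             while j < n and len(points_lists[j]) > 0: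
--                 j += 1
--             result.append(points_lists[i:j])
--             i = j
--         else:
--             i += 1
--     return result
-- ===== Notes on version B (the rewrite author's own statement) =====
-- stated objective: alternative
-- what changed: Replaces the accumulator-with-reset-and-final-flush-and-filter pass by a run scanner that jumps to each non-empty run and slices it out whole, so no current_contour state, no flush and no trailing empty-filter exist.
import Mathlib
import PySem

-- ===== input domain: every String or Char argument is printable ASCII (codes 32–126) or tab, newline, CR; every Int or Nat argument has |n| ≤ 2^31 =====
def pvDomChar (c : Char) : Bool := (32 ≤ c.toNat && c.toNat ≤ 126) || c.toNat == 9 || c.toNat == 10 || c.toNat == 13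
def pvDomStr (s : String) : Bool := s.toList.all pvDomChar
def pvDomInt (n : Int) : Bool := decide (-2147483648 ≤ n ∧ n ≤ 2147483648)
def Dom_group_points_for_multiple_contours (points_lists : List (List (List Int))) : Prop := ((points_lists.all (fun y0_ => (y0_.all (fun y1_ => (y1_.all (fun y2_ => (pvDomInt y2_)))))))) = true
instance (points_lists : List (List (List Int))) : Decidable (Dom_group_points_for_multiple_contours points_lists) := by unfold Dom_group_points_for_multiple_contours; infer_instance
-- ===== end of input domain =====

-- B replaces A's accumulator/reset/flush/filter pass by a run scanner that slices out each
-- non-empty run whole (objective: alternative, same cost).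


-- ===== PORT A =====
-- step of A's for-loop: state = (multiple_contours, current_contour)
def pvStepA (st : List (List (List (List Int))) × List (List (List Int))) (points_list : List (List Int)) :
    List (List (List (List Int))) × List (List (List Int)) :=
  if points_list.length > 0 then (st.1, st.2 ++ [points_list]) else (st.1 ++ [st.2], [])

def group_points_for_multiple_contours (points_lists : List (List (List Int))) : List (List (List (List Int))) :=
  let st := points_lists.foldl pvStepA ([], [])
  let multiple_contours := if st.2 ≠ [] then st.1 ++ [st.2] else st.1
  multiple_contours.filter (fun contour => decide (contour ≠ []))

-- ===== PORT B =====
-- predicate "points list is non-empty" (Source B's len(points_lists[j]) > 0)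
def pvNE (y : List (List Int)) : Bool := y.length > 0

-- Source B's outer while loop: on a non-empty element slice out the whole run, else skip
def pvScanB : List (List (List Int)) → List (List (List (List Int)))
  | [] => []
  | x :: xs =>
    if x.length > 0 then
      (x :: xs.takeWhile pvNE) :: pvScanB (xs.dropWhile pvNE)
    else pvScanB xs
termination_by l => l.length
decreasing_by
  · exact Nat.lt_succ_of_le (List.length_dropWhile_le _ _)
  · simp

def group_points_for_multiple_contours_alt (points_lists : List (List (List Int))) : List (List (List (List Int))) :=
  pvScanB points_lists

-- ===== PRECONDITION & SPEC =====
def Spec_group_points_for_multiple_contours (points_lists : List (List (List Int))) (out : List (List (List (List Int)))) : Prop := out = group_points_for_multiple_contours_alt points_lists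
instance (points_lists : List (List (List Int))) (out : List (List (List (List Int)))) : Decidable (Spec_group_points_for_multiple_contours points_lists out) := by unfold Spec_group_points_for_multiple_contours; infer_instance

-- ===== CLAIM (what is proved, stated in full; the proofs are below) =====
def Claim_equal_group_points_for_multiple_contours : Prop := ∀ (points_lists : List (List (List Int))), Dom_group_points_for_multiple_contours points_lists → Spec_group_points_for_multiple_contours points_lists (group_points_for_multiple_contours points_lists)

-- ===== LEMMAS AND PROOFS =====

-- A's post-processing (flush of the pending contour + empty filter) applied to a loop state
def pvFinishA (st : List (List (List (List Int))) × List (List (List Int))) : List (List (List (List Int))) :=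
  (if st.2 ≠ [] then st.1 ++ [st.2] else st.1).filter (fun contour => decide (contour ≠ []))

-- what B produces from a pending partial run `cur` followed by the remaining input `xs`
def pvCombine (cur : List (List (List Int))) (xs : List (List (List Int))) : List (List (List (List Int))) :=
  if cur = [] then pvScanB xs
  else (cur ++ xs.takeWhile pvNE) :: pvScanB (xs.dropWhile pvNE)

theorem pvKey (xs : List (List (List Int))) :
    ∀ (acc : List (List (List (List Int)))) (cur : List (List (List Int))),
    pvFinishA (xs.foldl pvStepA (acc, cur)) =
      acc.filter (fun contour => decide (contour ≠ [])) ++ pvCombine cur xs := by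
  induction xs with
  | nil =>
    intro acc cur
    by_cases h : cur = []
    · simp [pvFinishA, pvCombine, pvScanB, h]
    · simp [pvFinishA, pvCombine, pvScanB, h]
  | cons x xs ih =>
    intro acc cur
    by_cases hx : x.length > 0
    · have hstep : pvStepA (acc, cur) x = (acc, cur ++ [x]) := by
        simp [pvStepA, hx]
      rw [List.foldl_cons, hstep, ih]
      congr 1
      have hne : cur ++ [x] ≠ [] := by simp
      by_cases hc : cur = []
      · simp [pvCombine, hc, pvScanB, hx]
      · simp [pvCombine, hc, hne, pvNE, hx]
    · have hstep : pvStepA (acc, cur) x = (acc ++ [cur], []) := by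
        simp [pvStepA, hx]
      rw [List.foldl_cons, hstep, ih]
      by_cases hc : cur = []
      · simp [pvCombine, hc, pvScanB, hx]
      · simp [pvCombine, hc, pvScanB, hx, pvNE, List.filter_append]

-- ===== VERDICT (by name: the statement is the Claim_ definition above) =====
theorem group_points_for_multiple_contours_spec : Claim_equal_group_points_for_multiple_contours := by
  intro points_lists _
  unfold Spec_group_points_for_multiple_contours
  have h := pvKey points_lists [] []
  simpa [pvFinishA, pvCombine, group_points_for_multiple_contours,
    group_points_for_multiple_contours_alt] using h
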